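-- pv_equiv track=rewrite | github.com/macclaw2026-byte/JinClaw | tools/openmoss/control_center/acquisition_result_normalizer.py | _required_field_freshness_posture
-- ===== SOURCE A (Python) =====
-- from typing import Any, Dict, List
--
-- def _unique_preserve(values: List[str]) -> List[str]:
--     seen: set[str] = set()
--     ordered: List[str] = []
--     for value in values:
--         text = str(value).strip()
--         if not text or text in seen:
--             continue
--         seen.add(text)
--         ordered.append(text)
--     return ordered
--
-- def _required_field_freshness_posture(
--     required_fields: List[str],
--     field_provenance: Dict[str, Dict[str, Any]],
-- ) -> str:
--     alignments = _unique_preserve(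
--         [
--             str((field_provenance.get(field_name, {}) or {}).get("selected_freshness_alignment", "")).strip()
--             for field_name in required_fields
--             if str((field_provenance.get(field_name, {}) or {}).get("selected_freshness_alignment", "")).strip()
--         ]
--     )
--     if not alignments:
--         return "not_ready"
--     if any(item == "snapshot_only" for item in alignments):
--         return "snapshot_only"
--     if any(item == "session_snapshot" for item in alignments):
--         return "session_snapshot"
--     if any(item == "fresh_ready" for item in alignments):
--         return "fresh_ready"
--     if any(item == "adequate" for item in alignments):
--         return "adequate"
--     return alignments[0]
-- ===== SOURCE B (Python) =====
-- def _required_field_freshness_posture(required_fields, field_provenance):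
--     priority = {"snapshot_only": 0, "session_snapshot": 1, "fresh_ready": 2, "adequate": 3}
--     best = None  # (rank, value); a known value always beats an unknown, first seen wins ties
--     for field_name in required_fields:
--         text = str((field_provenance.get(field_name, {}) or {}).get("selected_freshness_alignment", "")).strip()
--         if not text:
--             continue
--         rank = priority.get(text, 4)
--         if best is None or rank < best[0]:
--             best = (rank, text)
--     return best[1] if best is not None else "not_ready"
-- ===== Notes on version B (the rewrite author's own statement) =====
-- stated objective: simpler
-- what changed: Replaces A's build-a-list + order-preserving dedupe + four any() membership scans by a single fold over required_fields that keeps the best-priority alignment seen so far (unknown values rank lowest, first one wins), returning it or 'not_ready'.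
import Mathlib
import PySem

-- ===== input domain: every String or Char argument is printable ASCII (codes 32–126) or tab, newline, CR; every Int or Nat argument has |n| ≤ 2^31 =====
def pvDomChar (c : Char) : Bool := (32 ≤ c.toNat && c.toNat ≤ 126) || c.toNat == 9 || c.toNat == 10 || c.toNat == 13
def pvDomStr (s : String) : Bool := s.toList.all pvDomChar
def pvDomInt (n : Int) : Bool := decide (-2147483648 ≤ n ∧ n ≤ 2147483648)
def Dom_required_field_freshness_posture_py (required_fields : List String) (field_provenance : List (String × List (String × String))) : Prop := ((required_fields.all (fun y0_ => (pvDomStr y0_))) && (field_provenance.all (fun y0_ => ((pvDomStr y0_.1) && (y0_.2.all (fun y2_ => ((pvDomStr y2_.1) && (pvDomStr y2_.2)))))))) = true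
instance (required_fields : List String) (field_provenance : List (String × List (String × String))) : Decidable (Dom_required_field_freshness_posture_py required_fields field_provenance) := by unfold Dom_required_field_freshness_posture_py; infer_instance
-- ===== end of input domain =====

-- B replaces A's build-list + dedupe + four any() scans by a single fold keeping the best-ranked
-- alignment (objective: simpler one-pass decomposition, same result).

-- ===== PORT A =====
-- shared subexpression of both Pythons:
-- str((field_provenance.get(field_name, {}) or {}).get("selected_freshness_alignment", "")).strip()
-- (values are strings here, so str() is the identity; 'or {}' cannot fire on a dict-of-dicts input)
def pvAlignText (field_provenance : List (String × List (String × String))) (field_name : String) : String :=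
  PySem.Str.strip (PySem.Dict.getD (PySem.Dict.mk (PySem.Dict.getD (PySem.Dict.mk field_provenance) field_name [])) "selected_freshness_alignment" "")

-- port of _unique_preserve
def pvUniquePreserve (values : List String) : List String :=
  (values.foldl (fun (st : PySem.Set String × List String) v =>
      let text := PySem.Str.strip v
      if text = "" ∨ st.1.contains text then st
      else (st.1.add text, st.2 ++ [text]))
    (PySem.Set.empty, [])).2

def required_field_freshness_posture_py (required_fields : List String) (field_provenance : List (String × List (String × String))) : String :=
  let alignments := pvUniquePreserve
    (required_fields.filterMap (fun field_name =>
      let t := pvAlignText field_provenance field_name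
      if t = "" then none else some t))
  if alignments.isEmpty then "not_ready"
  else if alignments.any (fun item => item == "snapshot_only") then "snapshot_only"
  else if alignments.any (fun item => item == "session_snapshot") then "session_snapshot"
  else if alignments.any (fun item => item == "fresh_ready") then "fresh_ready"
  else if alignments.any (fun item => item == "adequate") then "adequate"
  else (PySem.List.pyGet? alignments 0).getD ""   -- alignments[0]; index 0 in range (list nonempty here)

-- ===== PORT B =====
def pvPriority : PySem.Dict String Int :=
  PySem.Dict.mk [("snapshot_only", 0), ("session_snapshot", 1), ("fresh_ready", 2), ("adequate", 3)]

def required_field_freshness_posture_py_alt (required_fields : List String) (field_provenance : List (String × List (String × String))) : String :=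
  let best := required_fields.foldl (fun (best : Option (Int × String)) field_name =>
      let text := pvAlignText field_provenance field_name
      if text = "" then best
      else
        let rank := PySem.Dict.getD pvPriority text 4
        match best with
        | none => some (rank, text)
        | some b => if rank < b.1 then some (rank, text) else some b) none
  match best with
  | some b => b.2
  | none => "not_ready"

-- ===== PRECONDITION & SPEC =====
def Spec_required_field_freshness_posture_py (required_fields : List String) (field_provenance : List (String × List (String × String))) (out : String) : Prop := out = required_field_freshness_posture_py_alt required_fields field_provenance
instance (required_fields : List String) (field_provenance : List (String × List (String × String))) (out : String) : Decidable (Spec_required_field_freshness_posture_py required_fields field_provenance out) := by unfold Spec_required_field_freshness_posture_py; infer_instance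

-- ===== CLAIM (what is proved, stated in full; the proofs are below) =====
def Claim_equal_required_field_freshness_posture_py : Prop := ∀ (required_fields : List String) (field_provenance : List (String × List (String × String))), Dom_required_field_freshness_posture_py required_fields field_provenance → Spec_required_field_freshness_posture_py required_fields field_provenance (required_field_freshness_posture_py required_fields field_provenance)

-- ===== LEMMAS AND PROOFS =====

-- the rank B's priority dict assigns
def rkOf (t : String) : Int :=
  if t = "snapshot_only" then 0
  else if t = "session_snapshot" then 1
  else if t = "fresh_ready" then 2
  else if t = "adequate" then 3
  else 4

theorem getD_pvPriority (t : String) : PySem.Dict.getD pvPriority t 4 = rkOf t := by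
  rw [PySem.Dict.getD_eq_get?_getD]
  unfold pvPriority rkOf
  rw [PySem.Dict.get?_mk_cons, PySem.Dict.get?_mk_cons, PySem.Dict.get?_mk_cons,
    PySem.Dict.get?_mk_cons]
  simp only [beq_iff_eq]
  split_ifs <;> subst_eqs <;> (try simp_all) <;> rfl

theorem rk_inv (t : String) : t = "snapshot_only" ∨ t = "session_snapshot" ∨ t = "fresh_ready" ∨ t = "adequate" ∨ rkOf t = 4 := by
  unfold rkOf; split_ifs <;> tauto

-- the one-pass step of B, on an already-extracted nonempty text
def pvStepRk (best : Option (Int × String)) (text : String) : Option (Int × String) :=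
  match best with
  | none => some (rkOf text, text)
  | some b => if rkOf text < b.1 then some (rkOf text, text) else some b

-- strip is idempotent
theorem dropWhile_dropWhile (p : Char → Bool) (l : List Char) :
    List.dropWhile p (List.dropWhile p l) = List.dropWhile p l := by
  induction l with
  | nil => rfl
  | cons x t ih =>
    by_cases h : p x = true
    · simp [List.dropWhile_cons, h, ih]
    · simp [List.dropWhile_cons, h]

theorem lstrip_of_lstripped (cs : List Char) (h : PySem.Chars.lstrip cs = cs) :
    PySem.Chars.lstrip (PySem.Chars.rstrip cs) = PySem.Chars.rstrip cs := by
  have hpre : PySem.Chars.rstrip cs <+: cs := by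
    have hsuf : ((PySem.Chars.rstrip cs).reverse : List Char) <:+ cs.reverse := by
      unfold PySem.Chars.rstrip
      rw [List.reverse_reverse]
      exact List.dropWhile_suffix _
    exact List.reverse_suffix.mp hsuf
  obtain ⟨u, hu⟩ := hpre
  cases hcr : PySem.Chars.rstrip cs with
  | nil => rfl
  | cons c r =>
    rw [hcr] at hu
    unfold PySem.Chars.lstrip at h ⊢
    by_cases hc : PySem.Chars.isspace c = true
    · exfalso
      rw [← hu, List.cons_append, List.dropWhile_cons, if_pos hc] at h
      have hle := List.length_dropWhile_le PySem.Chars.isspace (r ++ u)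
      rw [h] at hle
      simp at hle
    · rw [List.dropWhile_cons, if_neg hc]

theorem chars_strip_idem (cs : List Char) : PySem.Chars.strip (PySem.Chars.strip cs) = PySem.Chars.strip cs := by
  unfold PySem.Chars.strip
  have h1 : PySem.Chars.lstrip (PySem.Chars.lstrip cs) = PySem.Chars.lstrip cs := by
    unfold PySem.Chars.lstrip; exact dropWhile_dropWhile _ _
  rw [lstrip_of_lstripped _ h1]
  unfold PySem.Chars.rstrip
  rw [List.reverse_reverse, dropWhile_dropWhile]

theorem strip_idem (s : String) : PySem.Str.strip (PySem.Str.strip s) = PySem.Str.strip s := by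
  unfold PySem.Str.strip
  rw [show (String.ofList (PySem.Chars.strip s.toList)).toList = PySem.Chars.strip s.toList by
    simp]
  rw [chars_strip_idem]

-- the dedup skeleton of _unique_preserve on already-stripped, nonempty strings
def gsel (S : PySem.Set String) : List String → List String
  | [] => []
  | x :: t => if S.contains x then gsel S t else x :: gsel (S.add x) t

theorem up_fold (L : List String) (S : PySem.Set String) (acc : List String)
    (h : ∀ t ∈ L, PySem.Str.strip t = t ∧ t ≠ "") :
    (L.foldl (fun (st : PySem.Set String × List String) v =>
      let text := PySem.Str.strip v
      if text = "" ∨ st.1.contains text then st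
      else (st.1.add text, st.2 ++ [text])) (S, acc)).2 = acc ++ gsel S L := by
  induction L generalizing S acc with
  | nil => simp [gsel]
  | cons v t ih =>
    obtain ⟨hs, hne⟩ := h v (List.mem_cons_self ..)
    have ht : ∀ x ∈ t, PySem.Str.strip x = x ∧ x ≠ "" :=
      fun x hx => h x (List.mem_cons_of_mem _ hx)
    rw [List.foldl_cons, gsel]
    by_cases hc : S.contains v = true
    · simp only [hs]
      rw [if_pos (Or.inr hc), if_pos hc]
      exact ih S acc ht
    · simp only [hs]
      rw [if_neg (by
        simp only [hne, false_or]
        exact hc), if_neg hc]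
      rw [ih (S.add v) (acc ++ [v]) ht, List.append_assoc]
      rfl

theorem mem_gsel (L : List String) (S : PySem.Set String) (a : String) :
    a ∈ gsel S L ↔ a ∈ L ∧ ¬ a ∈ S := by
  induction L generalizing S with
  | nil => simp [gsel]
  | cons x t ih =>
    rw [gsel]
    by_cases hx : S.contains x = true
    · have hxS : x ∈ S := (PySem.Set.contains_iff S x).mp hx
      rw [if_pos hx, ih, List.mem_cons]
      by_cases hax : a = x
      · subst hax; simp [hxS]
      · simp [hax]
    · have hxS : ¬ x ∈ S := fun m => hx ((PySem.Set.contains_iff S x).mpr m)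
      rw [if_neg hx, List.mem_cons, List.mem_cons, ih]
      simp only [PySem.Set.mem_add]
      by_cases hax : a = x
      · subst hax; simp [hxS]
      · simp [hax]

-- B's fold over required_fields = fold of the non-skip step over the filtered texts
theorem foldl_filterMap_skip {α β γ : Type} (g : β → γ) (P : γ → Prop) [DecidablePred P]
    (step : α → γ → α) (l : List β) (s : α) :
    l.foldl (fun acc b => if P (g b) then acc else step acc (g b)) s
      = (l.filterMap (fun b => if P (g b) then none else some (g b))).foldl step s := by
  induction l generalizing s with
  | nil => rfl
  | cons b l ih =>
    rw [List.foldl_cons, List.filterMap_cons]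
    by_cases h : P (g b)
    · rw [if_pos h, if_pos h]
      exact ih s
    · rw [if_neg h, if_neg h, List.foldl_cons]
      exact ih _

theorem fold_getD_eq_rk (L : List String) (s : Option (Int × String)) :
    L.foldl (fun (best : Option (Int × String)) text =>
        match best with
        | none => some (PySem.Dict.getD pvPriority text 4, text)
        | some b => if PySem.Dict.getD pvPriority text 4 < b.1 then some (PySem.Dict.getD pvPriority text 4, text) else some b) s
    = L.foldl (fun (best : Option (Int × String)) text =>
        match best with
        | none => some (rkOf text, text)
        | some b => if rkOf text < b.1 then some (rkOf text, text) else some b) s := by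
  induction L generalizing s with
  | nil => rfl
  | cons x L ih =>
    rw [List.foldl_cons, List.foldl_cons]
    have hx : (match s with
        | none => some (PySem.Dict.getD pvPriority x 4, x)
        | some b => if PySem.Dict.getD pvPriority x 4 < b.1 then some (PySem.Dict.getD pvPriority x 4, x) else some b)
        = (match s with
        | none => some (rkOf x, x)
        | some b => if rkOf x < b.1 then some (rkOf x, x) else some b) := by
      cases s <;> simp [getD_pvPriority]
    rw [hx]
    exact ih _

theorem b_fold_filter (rf : List String) (fp : List (String × List (String × String))) (s : Option (Int × String)) :
    rf.foldl (fun (best : Option (Int × String)) field_name =>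
      let text := pvAlignText fp field_name
      if text = "" then best
      else
        let rank := PySem.Dict.getD pvPriority text 4
        match best with
        | none => some (rank, text)
        | some b => if rank < b.1 then some (rank, text) else some b) s
    = (rf.filterMap (fun field_name =>
        let t := pvAlignText fp field_name
        if t = "" then none else some t)).foldl pvStepRk s := by
  have hg := foldl_filterMap_skip (g := pvAlignText fp) (P := fun t => t = "")
    (step := fun (best : Option (Int × String)) text =>
        match best with
        | none => some (PySem.Dict.getD pvPriority text 4, text)
        | some b => if PySem.Dict.getD pvPriority text 4 < b.1 then some (PySem.Dict.getD pvPriority text 4, text) else some b)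
    rf s
  refine hg.trans ?_
  exact fold_getD_eq_rk _ s


-- the min-fold: value and minimality
theorem min_fold_spec (t : List String) (v : String) :
    ∃ w, t.foldl pvStepRk (some (rkOf v, v)) = some (rkOf w, w) ∧ (w = v ∨ w ∈ t) ∧ rkOf w ≤ rkOf v ∧ ∀ y ∈ t, rkOf w ≤ rkOf y := by
  induction t generalizing v with
  | nil => exact ⟨v, rfl, Or.inl rfl, le_refl _, by simp⟩
  | cons x t ih =>
    rw [List.foldl_cons]
    by_cases hlt : rkOf x < rkOf v
    · simp only [pvStepRk, if_pos hlt]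
      obtain ⟨w, hw, hmem, hle, hall⟩ := ih x
      refine ⟨w, hw, ?_, ?_, ?_⟩
      · rcases hmem with rfl | hm
        · exact Or.inr (List.mem_cons_self ..)
        · exact Or.inr (List.mem_cons_of_mem _ hm)
      · omega
      · intro y hy
        rcases List.mem_cons.mp hy with rfl | hm
        · exact hle
        · exact hall y hm
    · simp only [pvStepRk, if_neg hlt]
      obtain ⟨w, hw, hmem, hle, hall⟩ := ih v
      refine ⟨w, hw, ?_, hle, ?_⟩
      · rcases hmem with rfl | hm
        · exact Or.inl rfl
        · exact Or.inr (List.mem_cons_of_mem _ hm)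
      · intro y hy
        rcases List.mem_cons.mp hy with rfl | hm
        · omega
        · exact hall y hm

theorem min_fold_keep (t : List String) (v : String) (h : ∀ y ∈ t, rkOf v ≤ rkOf y) :
    t.foldl pvStepRk (some (rkOf v, v)) = some (rkOf v, v) := by
  induction t with
  | nil => rfl
  | cons x t ih =>
    have hx := h x (List.mem_cons_self ..)
    rw [List.foldl_cons]
    simp only [pvStepRk, if_neg (by omega : ¬ rkOf x < rkOf v)]
    exact ih (fun y hy => h y (List.mem_cons_of_mem _ hy))

theorem rk_snapshot : rkOf "snapshot_only" = 0 := by decide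
theorem rk_session : rkOf "session_snapshot" = 1 := by decide
theorem rk_fresh : rkOf "fresh_ready" = 2 := by decide
theorem rk_adequate : rkOf "adequate" = 3 := by decide

-- A's posture chain over the deduplicated list equals B's one-pass minimum, for any list of
-- already-stripped nonempty alignment texts
theorem core_eq (L : List String) (HL : ∀ a ∈ L, PySem.Str.strip a = a ∧ a ≠ "") :
    (if (pvUniquePreserve L).isEmpty then "not_ready"
     else if (pvUniquePreserve L).any (fun item => item == "snapshot_only") then "snapshot_only"
     else if (pvUniquePreserve L).any (fun item => item == "session_snapshot") then "session_snapshot"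
     else if (pvUniquePreserve L).any (fun item => item == "fresh_ready") then "fresh_ready"
     else if (pvUniquePreserve L).any (fun item => item == "adequate") then "adequate"
     else (PySem.List.pyGet? (pvUniquePreserve L) 0).getD "")
    = (match L.foldl pvStepRk none with
       | some b => b.2
       | none => "not_ready") := by
  cases L with
  | nil => rfl
  | cons x t =>
    have hup : pvUniquePreserve (x :: t) = gsel PySem.Set.empty (x :: t) := by
      unfold pvUniquePreserve
      simpa using up_fold (x :: t) PySem.Set.empty [] HL
    have hmem : ∀ a, a ∈ pvUniquePreserve (x :: t) ↔ a ∈ x :: t := by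
      intro a
      rw [hup, mem_gsel]
      simp [PySem.Set.empty]
    have hcx : ¬ (PySem.Set.empty : PySem.Set String).contains x = true := by
      simp [PySem.Set.empty, PySem.Set.contains_eq_listContains]
    have hhead : pvUniquePreserve (x :: t) = x :: gsel (PySem.Set.empty.add x) t := by
      rw [hup, gsel, if_neg hcx]
    have hempty : (pvUniquePreserve (x :: t)).isEmpty = false := by
      rw [hhead]; rfl
    have hany : ∀ k, ((pvUniquePreserve (x :: t)).any (fun item => item == k) = true) ↔ k ∈ x :: t := by
      intro k
      simp only [List.any_eq_true, beq_iff_eq]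
      constructor
      · rintro ⟨a, ha, rfl⟩; exact (hmem a).mp ha
      · intro hk; exact ⟨k, (hmem k).mpr hk, rfl⟩
    have hfold : (x :: t).foldl pvStepRk none = t.foldl pvStepRk (some (rkOf x, x)) := rfl
    obtain ⟨w, hw, hwmem, hwle, hwall⟩ := min_fold_spec t x
    have hminL : ∀ y ∈ x :: t, rkOf w ≤ rkOf y := by
      intro y hy
      rcases List.mem_cons.mp hy with rfl | hm
      · exact hwle
      · exact hwall y hm
    have hwmemL : w ∈ x :: t := by
      rcases hwmem with rfl | hm
      · exact List.mem_cons_self ..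
      · exact List.mem_cons_of_mem _ hm
    simp only [hempty, Bool.false_eq_true, if_false]
    by_cases h0 : "snapshot_only" ∈ x :: t
    · rw [if_pos ((hany _).mpr h0), hfold, hw]
      show ("snapshot_only" : String) = w
      rcases rk_inv w with rfl | h | h | h | h4
      · rfl
      all_goals exfalso
      · have hc := hminL _ h0; rw [rk_snapshot, h, rk_session] at hc; omega
      · have hc := hminL _ h0; rw [rk_snapshot, h, rk_fresh] at hc; omega
      · have hc := hminL _ h0; rw [rk_snapshot, h, rk_adequate] at hc; omega
      · have hc := hminL _ h0; rw [rk_snapshot, h4] at hc; omega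
    · rw [if_neg (fun hh => h0 ((hany _).mp hh))]
      by_cases h1 : "session_snapshot" ∈ x :: t
      · rw [if_pos ((hany _).mpr h1), hfold, hw]
        show ("session_snapshot" : String) = w
        rcases rk_inv w with h | rfl | h | h | h4
        · exact absurd (h ▸ hwmemL) h0
        · rfl
        all_goals exfalso
        · have hc := hminL _ h1; rw [rk_session, h, rk_fresh] at hc; omega
        · have hc := hminL _ h1; rw [rk_session, h, rk_adequate] at hc; omega
        · have hc := hminL _ h1; rw [rk_session, h4] at hc; omega
      · rw [if_neg (fun hh => h1 ((hany _).mp hh))]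
        by_cases h2 : "fresh_ready" ∈ x :: t
        · rw [if_pos ((hany _).mpr h2), hfold, hw]
          show ("fresh_ready" : String) = w
          rcases rk_inv w with h | h | rfl | h | h4
          · exact absurd (h ▸ hwmemL) h0
          · exact absurd (h ▸ hwmemL) h1
          · rfl
          all_goals exfalso
          · have hc := hminL _ h2; rw [rk_fresh, h, rk_adequate] at hc; omega
          · have hc := hminL _ h2; rw [rk_fresh, h4] at hc; omega
        · rw [if_neg (fun hh => h2 ((hany _).mp hh))]
          by_cases h3 : "adequate" ∈ x :: t
          · rw [if_pos ((hany _).mpr h3), hfold, hw]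
            show ("adequate" : String) = w
            rcases rk_inv w with h | h | h | rfl | h4
            · exact absurd (h ▸ hwmemL) h0
            · exact absurd (h ▸ hwmemL) h1
            · exact absurd (h ▸ hwmemL) h2
            · rfl
            · exfalso; have hc := hminL _ h3; rw [rk_adequate, h4] at hc; omega
          · rw [if_neg (fun hh => h3 ((hany _).mp hh))]
            have hall4 : ∀ y ∈ x :: t, rkOf y = 4 := by
              intro y hy
              rcases rk_inv y with rfl | rfl | rfl | rfl | h4
              · exact absurd hy h0
              · exact absurd hy h1
              · exact absurd hy h2
              · exact absurd hy h3
              · exact h4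
            have hx4 : rkOf x = 4 := hall4 x (List.mem_cons_self ..)
            rw [hfold, min_fold_keep t x (fun y hy => by
              rw [hall4 y (List.mem_cons_of_mem _ hy), hx4]), hhead]
            show (PySem.List.pyGet? (x :: gsel (PySem.Set.empty.add x) t) 0).getD "" = x
            simp [PySem.List.pyGet?, PySem.List.pyIdx?]

-- ===== VERDICT (by name: the statement is the Claim_ definition above) =====
theorem required_field_freshness_posture_py_spec : Claim_equal_required_field_freshness_posture_py := by
  intro rf fp _hdom
  unfold Spec_required_field_freshness_posture_py
  have HL : ∀ a ∈ rf.filterMap (fun field_name =>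
      let t := pvAlignText fp field_name
      if t = "" then none else some t), PySem.Str.strip a = a ∧ a ≠ "" := by
    intro a ha
    rw [List.mem_filterMap] at ha
    obtain ⟨f, _, hf⟩ := ha
    by_cases h : pvAlignText fp f = ""
    · simp only [h, ite_true, reduceCtorEq] at hf
    · simp only [h, ite_false, Option.some_inj] at hf
      subst hf
      refine ⟨?_, h⟩
      unfold pvAlignText
      exact strip_idem _
  have hA : required_field_freshness_posture_py rf fp =
      (if (pvUniquePreserve (rf.filterMap (fun field_name =>
          let t := pvAlignText fp field_name
          if t = "" then none else some t))).isEmpty then "not_ready"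
       else if (pvUniquePreserve _).any (fun item => item == "snapshot_only") then "snapshot_only"
       else if (pvUniquePreserve _).any (fun item => item == "session_snapshot") then "session_snapshot"
       else if (pvUniquePreserve _).any (fun item => item == "fresh_ready") then "fresh_ready"
       else if (pvUniquePreserve _).any (fun item => item == "adequate") then "adequate"
       else (PySem.List.pyGet? (pvUniquePreserve _) 0).getD "") := rfl
  have hB : required_field_freshness_posture_py_alt rf fp =
      (match (rf.filterMap (fun field_name =>
          let t := pvAlignText fp field_name
          if t = "" then none else some t)).foldl pvStepRk none with
       | some b => b.2
       | none => "not_ready") := by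
    show (match rf.foldl (fun (best : Option (Int × String)) field_name =>
        let text := pvAlignText fp field_name
        if text = "" then best
        else
          let rank := PySem.Dict.getD pvPriority text 4
          match best with
          | none => some (rank, text)
          | some b => if rank < b.1 then some (rank, text) else some b) none with
       | some b => b.2
       | none => "not_ready") = _
    rw [b_fold_filter]
  rw [hA, hB]
  exact core_eq _ HL
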